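-- pv_equiv track=rewrite | github.com/audwndl/Coding-test | 프로그래머스/0/181916. 주사위 게임 3/주사위 게임 3.py | solution
-- ===== SOURCE A (Python) =====
-- from collections import Counter
--
-- def solution(a, b, c, d):
--     count = Counter([a, b, c, d])
--     values = list(count.values())
--     keys = list(count.keys())
--
--     if 4 in values:
--         return 1111 * keys[0]
--
--     elif 3 in values:
--         p = keys[values.index(3)]  # 세 번 나온 숫자
--         q = keys[values.index(1)]  # 한 번 나온 숫자
--         return (10 * p + q) ** 2
--
--     elif values.count(2) == 2:
--         p, q = keys
--         return (p + q) * abs(p - q)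
--
--     elif 2 in values and 1 in values:
--         p = keys[values.index(2)]  # 두 번 나온 숫자
--         q, r = [key for key, val in count.items() if val == 1]  # 한 번 나온 두 숫자
--         return q * r
--
--     else:
--         return min(a, b, c, d)
-- ===== SOURCE B (Python) =====
-- def solution(a, b, c, d):
--     # Sort the four dice with a 5-comparator sorting network, then branch on
--     # adjacent equalities of the sorted values (no Counter, no index scans).
--     lo1, hi1 = min(a, b), max(a, b)
--     lo2, hi2 = min(c, d), max(c, d)
--     s0, x = min(lo1, lo2), max(lo1, lo2)
--     y, s3 = min(hi1, hi2), max(hi1, hi2)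
--     s1, s2 = min(x, y), max(x, y)
--     if s0 == s3:                      # four of a kind
--         return 1111 * s0
--     if s0 == s2:                      # low triple + high single
--         return (10 * s0 + s3) ** 2
--     if s1 == s3:                      # high triple + low single
--         return (10 * s1 + s0) ** 2
--     if s0 == s1 and s2 == s3:         # two pairs
--         return (s0 + s2) * (s2 - s0)
--     if s0 == s1:                      # low pair, singles s2, s3
--         return s2 * s3
--     if s1 == s2:                      # middle pair, singles s0, s3
--         return s0 * s3
--     if s2 == s3:                      # high pair, singles s0, s1
--         return s0 * s1
--     return s0                         # all distinct: minimum
-- ===== Notes on version B (the rewrite author's own statement) =====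
-- stated objective: alternative
-- what changed: B replaces A's Counter/keys/values bookkeeping and index scans by a 5-comparator sorting network over the four dice and branches on adjacent equalities of the sorted values.
import Mathlib
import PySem

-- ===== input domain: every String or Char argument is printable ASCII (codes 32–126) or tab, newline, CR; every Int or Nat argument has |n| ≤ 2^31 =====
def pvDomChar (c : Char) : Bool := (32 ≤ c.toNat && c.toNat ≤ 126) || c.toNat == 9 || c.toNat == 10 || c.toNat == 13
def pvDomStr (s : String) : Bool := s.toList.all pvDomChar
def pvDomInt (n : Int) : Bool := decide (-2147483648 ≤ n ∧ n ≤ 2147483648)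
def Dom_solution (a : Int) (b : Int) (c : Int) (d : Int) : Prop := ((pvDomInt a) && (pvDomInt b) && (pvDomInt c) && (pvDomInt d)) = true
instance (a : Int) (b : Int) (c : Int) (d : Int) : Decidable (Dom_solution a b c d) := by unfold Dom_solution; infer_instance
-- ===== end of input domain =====

-- B replaces A's Counter/value-scans by a 5-comparator sorting network over the four dice
-- and branches on adjacent equalities of the sorted values (objective: alternative).

-- ===== PORT A =====
def solution (a : Int) (b : Int) (c : Int) (d : Int) : Int :=
  let count := PySem.Dict.counter [a, b, c, d]
  let values := count.values
  let keys := count.keys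
  if values.contains 4 then
    1111 * PySem.List.pyGetD keys 0 0
  else if values.contains 3 then
    let p := PySem.List.pyGetD keys (((PySem.List.index? values 3).getD 0 : Nat) : Int) 0
    let q := PySem.List.pyGetD keys (((PySem.List.index? values 1).getD 0 : Nat) : Int) 0
    (10 * p + q) ^ 2
  else if PySem.List.count values 2 == 2 then
    let p := PySem.List.pyGetD keys 0 0
    let q := PySem.List.pyGetD keys 1 0
    (p + q) * |p - q|
  else if values.contains 2 && values.contains 1 then
    -- 'q, r = [...]' unpacks a two-element list; other shapes are unreachable here
    let _p := PySem.List.pyGetD keys (((PySem.List.index? values 2).getD 0 : Nat) : Int) 0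
    match (count.items.filter (fun kv => kv.2 == 1)).map Prod.fst with
    | [q, r] => q * r
    | _ => 0
  else
    min a (min b (min c d))

-- ===== PORT B =====
def solution_alt (a : Int) (b : Int) (c : Int) (d : Int) : Int :=
  let lo1 := min a b
  let hi1 := max a b
  let lo2 := min c d
  let hi2 := max c d
  let s0 := min lo1 lo2
  let x := max lo1 lo2
  let y := min hi1 hi2
  let s3 := max hi1 hi2
  let s1 := min x y
  let s2 := max x y
  if s0 = s3 then 1111 * s0
  else if s0 = s2 then (10 * s0 + s3) ^ 2
  else if s1 = s3 then (10 * s1 + s0) ^ 2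
  else if s0 = s1 ∧ s2 = s3 then (s0 + s2) * (s2 - s0)
  else if s0 = s1 then s2 * s3
  else if s1 = s2 then s0 * s3
  else if s2 = s3 then s0 * s1
  else s0

-- ===== PRECONDITION & SPEC =====
def Spec_solution (a : Int) (b : Int) (c : Int) (d : Int) (out : Int) : Prop := out = solution_alt a b c d
instance (a : Int) (b : Int) (c : Int) (d : Int) (out : Int) : Decidable (Spec_solution a b c d out) := by unfold Spec_solution; infer_instance

-- ===== CLAIM (what is proved, stated in full; the proofs are below) =====
def Claim_equal_solution : Prop := ∀ (a : Int) (b : Int) (c : Int) (d : Int), Dom_solution a b c d → Spec_solution a b c d (solution a b c d)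

-- ===== LEMMAS AND PROOFS =====

-- One lemma per equality pattern of the four dice (15 set partitions of the positions);
-- the verdict theorem dispatches on which of the six pairwise equalities hold.

set_option maxHeartbeats 2000000 in
lemma pA_xxxx (x : Int) :
    solution x x x x = solution_alt x x x x := by
  have hkeys : PySem.Set.ofList [x, x, x, x] = [x] := by
    simp [PySem.Set.ofList, PySem.Set.add]
  simp only [solution, solution_alt, PySem.Dict.values, PySem.Dict.items_counter,
    PySem.Dict.keys_counter, hkeys]
  simp only [List.map_cons, List.map_nil, List.count_cons, List.count_nil, beq_iff_eq, if_true, if_false]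
  norm_num [PySem.List.pyGetD_natCast, PySem.List.pyGetD_ofNat', PySem.List.index?_eq_idxOf?]
  all_goals (
    (try simp [min_def, max_def, *]) <;> (try split_ifs) <;>
    first
      | rfl | ring1 | omega | (exfalso; omega)
      | (rw [abs_of_nonneg (by omega)]; ring1)
      | (rw [abs_of_nonpos (by omega)]; ring1)
      | (left; rw [abs_of_nonneg (by omega)]; ring1)
      | (left; rw [abs_of_nonpos (by omega)]; ring1))

set_option maxHeartbeats 2000000 in
lemma pA_xxxy (x : Int) (y : Int) (hxy : x ≠ y) :
    solution x x x y = solution_alt x x x y := by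
  have hkeys : PySem.Set.ofList [x, x, x, y] = [x, y] := by
    simp [PySem.Set.ofList, PySem.Set.add, hxy, hxy.symm]
  simp only [solution, solution_alt, PySem.Dict.values, PySem.Dict.items_counter,
    PySem.Dict.keys_counter, hkeys]
  simp only [List.map_cons, List.map_nil, List.count_cons, List.count_nil, beq_iff_eq, hxy, hxy.symm, if_true, if_false]
  norm_num [PySem.List.pyGetD_natCast, PySem.List.pyGetD_ofNat', PySem.List.index?_eq_idxOf?]
  all_goals (rcases le_total x y with hxyo|hxyo <;>
    (try simp [min_def, max_def, *]) <;> (try split_ifs) <;>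
    first
      | rfl | ring1 | omega | (exfalso; omega)
      | (rw [abs_of_nonneg (by omega)]; ring1)
      | (rw [abs_of_nonpos (by omega)]; ring1)
      | (left; rw [abs_of_nonneg (by omega)]; ring1)
      | (left; rw [abs_of_nonpos (by omega)]; ring1))

set_option maxHeartbeats 2000000 in
lemma pA_xxyx (x : Int) (y : Int) (hxy : x ≠ y) :
    solution x x y x = solution_alt x x y x := by
  have hkeys : PySem.Set.ofList [x, x, y, x] = [x, y] := by
    simp [PySem.Set.ofList, PySem.Set.add, hxy, hxy.symm]
  simp only [solution, solution_alt, PySem.Dict.values, PySem.Dict.items_counter,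
    PySem.Dict.keys_counter, hkeys]
  simp only [List.map_cons, List.map_nil, List.count_cons, List.count_nil, beq_iff_eq, hxy, hxy.symm, if_true, if_false]
  norm_num [PySem.List.pyGetD_natCast, PySem.List.pyGetD_ofNat', PySem.List.index?_eq_idxOf?]
  all_goals (rcases le_total x y with hxyo|hxyo <;>
    (try simp [min_def, max_def, *]) <;> (try split_ifs) <;>
    first
      | rfl | ring1 | omega | (exfalso; omega)
      | (rw [abs_of_nonneg (by omega)]; ring1)
      | (rw [abs_of_nonpos (by omega)]; ring1)
      | (left; rw [abs_of_nonneg (by omega)]; ring1)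
      | (left; rw [abs_of_nonpos (by omega)]; ring1))

set_option maxHeartbeats 2000000 in
lemma pA_xyxx (x : Int) (y : Int) (hxy : x ≠ y) :
    solution x y x x = solution_alt x y x x := by
  have hkeys : PySem.Set.ofList [x, y, x, x] = [x, y] := by
    simp [PySem.Set.ofList, PySem.Set.add, hxy, hxy.symm]
  simp only [solution, solution_alt, PySem.Dict.values, PySem.Dict.items_counter,
    PySem.Dict.keys_counter, hkeys]
  simp only [List.map_cons, List.map_nil, List.count_cons, List.count_nil, beq_iff_eq, hxy, hxy.symm, if_true, if_false]
  norm_num [PySem.List.pyGetD_natCast, PySem.List.pyGetD_ofNat', PySem.List.index?_eq_idxOf?]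
  all_goals (rcases le_total x y with hxyo|hxyo <;>
    (try simp [min_def, max_def, *]) <;> (try split_ifs) <;>
    first
      | rfl | ring1 | omega | (exfalso; omega)
      | (rw [abs_of_nonneg (by omega)]; ring1)
      | (rw [abs_of_nonpos (by omega)]; ring1)
      | (left; rw [abs_of_nonneg (by omega)]; ring1)
      | (left; rw [abs_of_nonpos (by omega)]; ring1))

set_option maxHeartbeats 2000000 in
lemma pA_yxxx (x : Int) (y : Int) (hxy : x ≠ y) :
    solution y x x x = solution_alt y x x x := by
  have hkeys : PySem.Set.ofList [y, x, x, x] = [y, x] := by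
    simp [PySem.Set.ofList, PySem.Set.add, hxy, hxy.symm]
  simp only [solution, solution_alt, PySem.Dict.values, PySem.Dict.items_counter,
    PySem.Dict.keys_counter, hkeys]
  simp only [List.map_cons, List.map_nil, List.count_cons, List.count_nil, beq_iff_eq, hxy, hxy.symm, if_true, if_false]
  norm_num [PySem.List.pyGetD_natCast, PySem.List.pyGetD_ofNat', PySem.List.index?_eq_idxOf?]
  all_goals (rcases le_total x y with hxyo|hxyo <;>
    (try simp [min_def, max_def, *]) <;> (try split_ifs) <;>
    first
      | rfl | ring1 | omega | (exfalso; omega)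
      | (rw [abs_of_nonneg (by omega)]; ring1)
      | (rw [abs_of_nonpos (by omega)]; ring1)
      | (left; rw [abs_of_nonneg (by omega)]; ring1)
      | (left; rw [abs_of_nonpos (by omega)]; ring1))

set_option maxHeartbeats 2000000 in
lemma pA_xxyy (x : Int) (y : Int) (hxy : x ≠ y) :
    solution x x y y = solution_alt x x y y := by
  have hkeys : PySem.Set.ofList [x, x, y, y] = [x, y] := by
    simp [PySem.Set.ofList, PySem.Set.add, hxy, hxy.symm]
  simp only [solution, solution_alt, PySem.Dict.values, PySem.Dict.items_counter,
    PySem.Dict.keys_counter, hkeys]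
  simp only [List.map_cons, List.map_nil, List.count_cons, List.count_nil, beq_iff_eq, hxy, hxy.symm, if_true, if_false]
  norm_num [PySem.List.pyGetD_natCast, PySem.List.pyGetD_ofNat', PySem.List.index?_eq_idxOf?]
  all_goals (rcases le_total x y with hxyo|hxyo <;>
    (try simp [min_def, max_def, *]) <;> (try split_ifs) <;>
    first
      | rfl | ring1 | omega | (exfalso; omega)
      | (rw [abs_of_nonneg (by omega)]; ring1)
      | (rw [abs_of_nonpos (by omega)]; ring1)
      | (left; rw [abs_of_nonneg (by omega)]; ring1)
      | (left; rw [abs_of_nonpos (by omega)]; ring1))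

set_option maxHeartbeats 2000000 in
lemma pA_xyxy (x : Int) (y : Int) (hxy : x ≠ y) :
    solution x y x y = solution_alt x y x y := by
  have hkeys : PySem.Set.ofList [x, y, x, y] = [x, y] := by
    simp [PySem.Set.ofList, PySem.Set.add, hxy, hxy.symm]
  simp only [solution, solution_alt, PySem.Dict.values, PySem.Dict.items_counter,
    PySem.Dict.keys_counter, hkeys]
  simp only [List.map_cons, List.map_nil, List.count_cons, List.count_nil, beq_iff_eq, hxy, hxy.symm, if_true, if_false]
  norm_num [PySem.List.pyGetD_natCast, PySem.List.pyGetD_ofNat', PySem.List.index?_eq_idxOf?]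
  all_goals (rcases le_total x y with hxyo|hxyo <;>
    (try simp [min_def, max_def, *]) <;> (try split_ifs) <;>
    first
      | rfl | ring1 | omega | (exfalso; omega)
      | (rw [abs_of_nonneg (by omega)]; ring1)
      | (rw [abs_of_nonpos (by omega)]; ring1)
      | (left; rw [abs_of_nonneg (by omega)]; ring1)
      | (left; rw [abs_of_nonpos (by omega)]; ring1))

set_option maxHeartbeats 2000000 in
lemma pA_xyyx (x : Int) (y : Int) (hxy : x ≠ y) :
    solution x y y x = solution_alt x y y x := by
  have hkeys : PySem.Set.ofList [x, y, y, x] = [x, y] := by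
    simp [PySem.Set.ofList, PySem.Set.add, hxy, hxy.symm]
  simp only [solution, solution_alt, PySem.Dict.values, PySem.Dict.items_counter,
    PySem.Dict.keys_counter, hkeys]
  simp only [List.map_cons, List.map_nil, List.count_cons, List.count_nil, beq_iff_eq, hxy, hxy.symm, if_true, if_false]
  norm_num [PySem.List.pyGetD_natCast, PySem.List.pyGetD_ofNat', PySem.List.index?_eq_idxOf?]
  all_goals (rcases le_total x y with hxyo|hxyo <;>
    (try simp [min_def, max_def, *]) <;> (try split_ifs) <;>
    first
      | rfl | ring1 | omega | (exfalso; omega)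
      | (rw [abs_of_nonneg (by omega)]; ring1)
      | (rw [abs_of_nonpos (by omega)]; ring1)
      | (left; rw [abs_of_nonneg (by omega)]; ring1)
      | (left; rw [abs_of_nonpos (by omega)]; ring1))

set_option maxHeartbeats 2000000 in
lemma pA_xxyz (x : Int) (y : Int) (z : Int) (hxy : x ≠ y) (hxz : x ≠ z) (hyz : y ≠ z) :
    solution x x y z = solution_alt x x y z := by
  have hkeys : PySem.Set.ofList [x, x, y, z] = [x, y, z] := by
    simp [PySem.Set.ofList, PySem.Set.add, hxy, hxz, hyz, hxy.symm, hxz.symm, hyz.symm]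
  simp only [solution, solution_alt, PySem.Dict.values, PySem.Dict.items_counter,
    PySem.Dict.keys_counter, hkeys]
  simp only [List.map_cons, List.map_nil, List.count_cons, List.count_nil, beq_iff_eq, hxy, hxz, hyz, hxy.symm, hxz.symm, hyz.symm, if_true, if_false]
  norm_num [PySem.List.pyGetD_natCast, PySem.List.pyGetD_ofNat', PySem.List.index?_eq_idxOf?]
  all_goals (rcases le_total x y with hxyo|hxyo <;>
    rcases le_total x z with hxzo|hxzo <;>
    rcases le_total y z with hyzo|hyzo <;>
    (try simp [min_def, max_def, *]) <;> (try split_ifs) <;>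
    first
      | rfl | ring1 | omega | (exfalso; omega)
      | (rw [abs_of_nonneg (by omega)]; ring1)
      | (rw [abs_of_nonpos (by omega)]; ring1)
      | (left; rw [abs_of_nonneg (by omega)]; ring1)
      | (left; rw [abs_of_nonpos (by omega)]; ring1))

set_option maxHeartbeats 2000000 in
lemma pA_xyxz (x : Int) (y : Int) (z : Int) (hxy : x ≠ y) (hxz : x ≠ z) (hyz : y ≠ z) :
    solution x y x z = solution_alt x y x z := by
  have hkeys : PySem.Set.ofList [x, y, x, z] = [x, y, z] := by
    simp [PySem.Set.ofList, PySem.Set.add, hxy, hxz, hyz, hxy.symm, hxz.symm, hyz.symm]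
  simp only [solution, solution_alt, PySem.Dict.values, PySem.Dict.items_counter,
    PySem.Dict.keys_counter, hkeys]
  simp only [List.map_cons, List.map_nil, List.count_cons, List.count_nil, beq_iff_eq, hxy, hxz, hyz, hxy.symm, hxz.symm, hyz.symm, if_true, if_false]
  norm_num [PySem.List.pyGetD_natCast, PySem.List.pyGetD_ofNat', PySem.List.index?_eq_idxOf?]
  all_goals (rcases le_total x y with hxyo|hxyo <;>
    rcases le_total x z with hxzo|hxzo <;>
    rcases le_total y z with hyzo|hyzo <;>
    (try simp [min_def, max_def, *]) <;> (try split_ifs) <;>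
    first
      | rfl | ring1 | omega | (exfalso; omega)
      | (rw [abs_of_nonneg (by omega)]; ring1)
      | (rw [abs_of_nonpos (by omega)]; ring1)
      | (left; rw [abs_of_nonneg (by omega)]; ring1)
      | (left; rw [abs_of_nonpos (by omega)]; ring1))

set_option maxHeartbeats 2000000 in
lemma pA_xyzx (x : Int) (y : Int) (z : Int) (hxy : x ≠ y) (hxz : x ≠ z) (hyz : y ≠ z) :
    solution x y z x = solution_alt x y z x := by
  have hkeys : PySem.Set.ofList [x, y, z, x] = [x, y, z] := by
    simp [PySem.Set.ofList, PySem.Set.add, hxy, hxz, hyz, hxy.symm, hxz.symm, hyz.symm]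
  simp only [solution, solution_alt, PySem.Dict.values, PySem.Dict.items_counter,
    PySem.Dict.keys_counter, hkeys]
  simp only [List.map_cons, List.map_nil, List.count_cons, List.count_nil, beq_iff_eq, hxy, hxz, hyz, hxy.symm, hxz.symm, hyz.symm, if_true, if_false]
  norm_num [PySem.List.pyGetD_natCast, PySem.List.pyGetD_ofNat', PySem.List.index?_eq_idxOf?]
  all_goals (rcases le_total x y with hxyo|hxyo <;>
    rcases le_total x z with hxzo|hxzo <;>
    rcases le_total y z with hyzo|hyzo <;>
    (try simp [min_def, max_def, *]) <;> (try split_ifs) <;>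
    first
      | rfl | ring1 | omega | (exfalso; omega)
      | (rw [abs_of_nonneg (by omega)]; ring1)
      | (rw [abs_of_nonpos (by omega)]; ring1)
      | (left; rw [abs_of_nonneg (by omega)]; ring1)
      | (left; rw [abs_of_nonpos (by omega)]; ring1))

set_option maxHeartbeats 2000000 in
lemma pA_yxxz (x : Int) (y : Int) (z : Int) (hxy : x ≠ y) (hxz : x ≠ z) (hyz : y ≠ z) :
    solution y x x z = solution_alt y x x z := by
  have hkeys : PySem.Set.ofList [y, x, x, z] = [y, x, z] := by
    simp [PySem.Set.ofList, PySem.Set.add, hxy, hxz, hyz, hxy.symm, hxz.symm, hyz.symm]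
  simp only [solution, solution_alt, PySem.Dict.values, PySem.Dict.items_counter,
    PySem.Dict.keys_counter, hkeys]
  simp only [List.map_cons, List.map_nil, List.count_cons, List.count_nil, beq_iff_eq, hxy, hxz, hyz, hxy.symm, hxz.symm, hyz.symm, if_true, if_false]
  norm_num [PySem.List.pyGetD_natCast, PySem.List.pyGetD_ofNat', PySem.List.index?_eq_idxOf?]
  all_goals (rcases le_total x y with hxyo|hxyo <;>
    rcases le_total x z with hxzo|hxzo <;>
    rcases le_total y z with hyzo|hyzo <;>
    (try simp [min_def, max_def, *]) <;> (try split_ifs) <;>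
    first
      | rfl | ring1 | omega | (exfalso; omega)
      | (rw [abs_of_nonneg (by omega)]; ring1)
      | (rw [abs_of_nonpos (by omega)]; ring1)
      | (left; rw [abs_of_nonneg (by omega)]; ring1)
      | (left; rw [abs_of_nonpos (by omega)]; ring1))

set_option maxHeartbeats 2000000 in
lemma pA_yxzx (x : Int) (y : Int) (z : Int) (hxy : x ≠ y) (hxz : x ≠ z) (hyz : y ≠ z) :
    solution y x z x = solution_alt y x z x := by
  have hkeys : PySem.Set.ofList [y, x, z, x] = [y, x, z] := by
    simp [PySem.Set.ofList, PySem.Set.add, hxy, hxz, hyz, hxy.symm, hxz.symm, hyz.symm]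
  simp only [solution, solution_alt, PySem.Dict.values, PySem.Dict.items_counter,
    PySem.Dict.keys_counter, hkeys]
  simp only [List.map_cons, List.map_nil, List.count_cons, List.count_nil, beq_iff_eq, hxy, hxz, hyz, hxy.symm, hxz.symm, hyz.symm, if_true, if_false]
  norm_num [PySem.List.pyGetD_natCast, PySem.List.pyGetD_ofNat', PySem.List.index?_eq_idxOf?]
  all_goals (rcases le_total x y with hxyo|hxyo <;>
    rcases le_total x z with hxzo|hxzo <;>
    rcases le_total y z with hyzo|hyzo <;>
    (try simp [min_def, max_def, *]) <;> (try split_ifs) <;>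
    first
      | rfl | ring1 | omega | (exfalso; omega)
      | (rw [abs_of_nonneg (by omega)]; ring1)
      | (rw [abs_of_nonpos (by omega)]; ring1)
      | (left; rw [abs_of_nonneg (by omega)]; ring1)
      | (left; rw [abs_of_nonpos (by omega)]; ring1))

set_option maxHeartbeats 2000000 in
lemma pA_yzxx (x : Int) (y : Int) (z : Int) (hxy : x ≠ y) (hxz : x ≠ z) (hyz : y ≠ z) :
    solution y z x x = solution_alt y z x x := by
  have hkeys : PySem.Set.ofList [y, z, x, x] = [y, z, x] := by
    simp [PySem.Set.ofList, PySem.Set.add, hxy, hxz, hyz, hxy.symm, hxz.symm, hyz.symm]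
  simp only [solution, solution_alt, PySem.Dict.values, PySem.Dict.items_counter,
    PySem.Dict.keys_counter, hkeys]
  simp only [List.map_cons, List.map_nil, List.count_cons, List.count_nil, beq_iff_eq, hxy, hxz, hyz, hxy.symm, hxz.symm, hyz.symm, if_true, if_false]
  norm_num [PySem.List.pyGetD_natCast, PySem.List.pyGetD_ofNat', PySem.List.index?_eq_idxOf?]
  all_goals (rcases le_total x y with hxyo|hxyo <;>
    rcases le_total x z with hxzo|hxzo <;>
    rcases le_total y z with hyzo|hyzo <;>
    (try simp [min_def, max_def, *]) <;> (try split_ifs) <;>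
    first
      | rfl | ring1 | omega | (exfalso; omega)
      | (rw [abs_of_nonneg (by omega)]; ring1)
      | (rw [abs_of_nonpos (by omega)]; ring1)
      | (left; rw [abs_of_nonneg (by omega)]; ring1)
      | (left; rw [abs_of_nonpos (by omega)]; ring1))

set_option maxHeartbeats 2000000 in
lemma pA_xyzw (x : Int) (y : Int) (z : Int) (w : Int) (hxy : x ≠ y) (hxz : x ≠ z) (hxw : x ≠ w) (hyz : y ≠ z) (hyw : y ≠ w) (hzw : z ≠ w) :
    solution x y z w = solution_alt x y z w := by
  have hkeys : PySem.Set.ofList [x, y, z, w] = [x, y, z, w] := by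
    simp [PySem.Set.ofList, PySem.Set.add, hxy, hxz, hxw, hyz, hyw, hzw, hxy.symm, hxz.symm, hxw.symm, hyz.symm, hyw.symm, hzw.symm]
  simp only [solution, solution_alt, PySem.Dict.values, PySem.Dict.items_counter,
    PySem.Dict.keys_counter, hkeys]
  simp only [List.map_cons, List.map_nil, List.count_cons, List.count_nil, beq_iff_eq, hxy, hxz, hxw, hyz, hyw, hzw, hxy.symm, hxz.symm, hxw.symm, hyz.symm, hyw.symm, hzw.symm, if_true, if_false]
  norm_num [PySem.List.pyGetD_natCast, PySem.List.pyGetD_ofNat', PySem.List.index?_eq_idxOf?]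
  all_goals (rcases le_total x y with hxyo|hxyo <;>
    rcases le_total x z with hxzo|hxzo <;>
    rcases le_total x w with hxwo|hxwo <;>
    rcases le_total y z with hyzo|hyzo <;>
    rcases le_total y w with hywo|hywo <;>
    rcases le_total z w with hzwo|hzwo <;>
    (try simp [min_def, max_def, *]) <;> (try split_ifs) <;>
    first
      | rfl | ring1 | omega | (exfalso; omega)
      | (rw [abs_of_nonneg (by omega)]; ring1)
      | (rw [abs_of_nonpos (by omega)]; ring1)
      | (left; rw [abs_of_nonneg (by omega)]; ring1)
      | (left; rw [abs_of_nonpos (by omega)]; ring1))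

theorem main_eq (a b c d : Int) : solution a b c d = solution_alt a b c d := by
  by_cases hab : a = b <;> by_cases hac : a = c <;> by_cases had : a = d <;>
    by_cases hbc : b = c <;> by_cases hbd : b = d <;> by_cases hcd : c = d
  · rw [← hab, ← hac, ← had]; exact pA_xxxx a
  · exfalso; omega
  · exfalso; omega
  · exfalso; omega
  · exfalso; omega
  · exfalso; omega
  · exfalso; omega
  · exfalso; omega
  · exfalso; omega
  · exfalso; omega
  · exfalso; omega
  · rw [← hab, ← hac]; exact pA_xxxy a d (by omega)
  · exfalso; omega
  · exfalso; omega
  · exfalso; omega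
  · exfalso; omega
  · exfalso; omega
  · exfalso; omega
  · exfalso; omega
  · exfalso; omega
  · exfalso; omega
  · rw [← hab, ← had]; exact pA_xxyx a c (by omega)
  · exfalso; omega
  · exfalso; omega
  · exfalso; omega
  · exfalso; omega
  · exfalso; omega
  · exfalso; omega
  · exfalso; omega
  · exfalso; omega
  · rw [← hab, ← hcd]; exact pA_xxyy a c (by omega)
  · rw [← hab]; exact pA_xxyz a c d (by omega) (by omega) (by omega)
  · exfalso; omega
  · exfalso; omega
  · exfalso; omega
  · exfalso; omega
  · exfalso; omega
  · exfalso; omega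
  · rw [← hac, ← had]; exact pA_xyxx a b (by omega)
  · exfalso; omega
  · exfalso; omega
  · exfalso; omega
  · exfalso; omega
  · exfalso; omega
  · exfalso; omega
  · rw [← hac, ← hbd]; exact pA_xyxy a b (by omega)
  · exfalso; omega
  · rw [← hac]; exact pA_xyxz a b d (by omega) (by omega) (by omega)
  · exfalso; omega
  · exfalso; omega
  · exfalso; omega
  · rw [← hbc, ← had]; exact pA_xyyx a b (by omega)
  · exfalso; omega
  · exfalso; omega
  · exfalso; omega
  · rw [← had]; exact pA_xyzx a b c (by omega) (by omega) (by omega)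
  · rw [← hbc, ← hbd]; exact pA_yxxx b a (by omega)
  · exfalso; omega
  · exfalso; omega
  · rw [← hbc]; exact pA_yxxz b a d (by omega) (by omega) (by omega)
  · exfalso; omega
  · rw [← hbd]; exact pA_yxzx b a c (by omega) (by omega) (by omega)
  · rw [← hcd]; exact pA_yzxx c a b (by omega) (by omega) (by omega)
  · exact pA_xyzw a b c d (by omega) (by omega) (by omega) (by omega) (by omega) (by omega)

-- ===== VERDICT (by name: the statement is the Claim_ definition above) =====
theorem solution_spec : Claim_equal_solution := by
  intro a b c d _
  show solution a b c d = solution_alt a b c d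
  exact main_eq a b c d
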